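-- pv_equiv track=rewrite | github.com/Fred62879/neural-deep-field | wisp/utils/trans.py | measure_one
-- ===== SOURCE A (Python) =====
-- def measure_one(wave, trans, threshold, cho):
--     # measure wavelength num/range where current band has above-thresh trans val
--     start, n = -1, len(trans)
--     for i in range(n):
--         if start == -1:
--             if trans[i] > threshold: start = i
--         else:
--             if trans[i] < threshold or i == n - 1:
--                 if cho == 0: val = int(i - start)
--                 else: val = int(wave[i] - wave[start])
--                 return val
--     assert(False)
-- ===== SOURCE B (Python) =====
-- def measure_one(wave, trans, threshold, cho):
--     # candidate-set formulation: materialize every index above / below threshold,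
--     # then take minima -- no stateful scan, no early return
--     n = len(trans)
--     above = [i for i, t in enumerate(trans) if t > threshold]
--     start = min(above)
--     below = [i for i, t in enumerate(trans) if t < threshold and i > start]
--     end = min(below) if below else n - 1
--     return int(end - start) if cho == 0 else int(wave[end] - wave[start])
-- ===== Notes on version B (the rewrite author's own statement) =====
-- stated objective: alternative
-- what changed: Replaces A's stateful early-return scan (start=-1 flag flipped mid-loop) by a candidate-set formulation: two comprehensions materialize the full lists of above-threshold and later below-threshold indices and min() picks the band endpoints, with no early exit and no loop state.
-- outside the precondition, e.g. on measure_one([0, 10], [5, 1, 0], 3, 1): A returns 10, B returns 10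
import Mathlib
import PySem

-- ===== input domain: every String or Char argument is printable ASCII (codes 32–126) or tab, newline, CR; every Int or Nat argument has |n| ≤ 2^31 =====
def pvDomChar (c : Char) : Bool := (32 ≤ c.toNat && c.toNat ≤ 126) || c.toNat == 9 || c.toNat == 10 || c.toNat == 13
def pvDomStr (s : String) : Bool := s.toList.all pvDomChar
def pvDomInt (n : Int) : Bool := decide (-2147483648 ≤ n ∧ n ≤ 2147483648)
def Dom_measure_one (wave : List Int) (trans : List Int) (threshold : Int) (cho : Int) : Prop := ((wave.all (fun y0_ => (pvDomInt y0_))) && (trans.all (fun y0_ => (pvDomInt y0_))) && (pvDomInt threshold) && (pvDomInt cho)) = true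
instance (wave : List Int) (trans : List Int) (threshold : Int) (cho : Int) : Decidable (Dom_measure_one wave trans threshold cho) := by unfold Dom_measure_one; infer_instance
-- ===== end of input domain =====

-- B replaces A's stateful early-return scan by a candidate-set formulation:
-- materialize the lists of above-threshold and later below-threshold indices
-- and take minima; objective: alternative (same O(n) cost, no early exit).

-- ===== PORT A =====
-- the for-loop with its mutable 'start' and early return, as structural recursion on i
def measureLoopA (wave : List Int) (trans : List Int) (threshold : Int) (cho : Int) :
    Nat → Nat → Int → Option Int
  | 0, _, _ => none  -- loop finished: assert(False)
  | rem + 1, i, start =>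
    if i < trans.length then
      if start = -1 then
        if threshold < trans.getD i 0 then
          measureLoopA wave trans threshold cho rem (i + 1) (Int.ofNat i)
        else
          measureLoopA wave trans threshold cho rem (i + 1) start
      else
        if trans.getD i 0 < threshold ∨ i = trans.length - 1 then
          if cho = 0 then some ((i : Int) - start)
          else
            -- wave[i] - wave[start]; pyGet? = none is Python's IndexError
            match PySem.List.pyGet? wave (i : Int), PySem.List.pyGet? wave start with
            | some a, some b => some (a - b)
            | _, _ => none
        else
          measureLoopA wave trans threshold cho rem (i + 1) start
    else none

def measure_one (wave : List Int) (trans : List Int) (threshold : Int) (cho : Int) : Int :=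
  (measureLoopA wave trans threshold cho trans.length 0 (-1)).getD 0

-- ===== PORT B =====
def measure_one_alt (wave : List Int) (trans : List Int) (threshold : Int) (cho : Int) : Int :=
  -- above = [i for i, t in enumerate(trans) if t > threshold]; start = min(above)
  match PySem.List.min?
      (((PySem.List.enumerate trans 0).filter (fun p => decide (threshold < p.2))).map Prod.fst)
      (fun x => x) with
  | none => 0  -- min([]) raises ValueError in Python (outside Pre_)
  | some start =>
    -- below = [i for i, t in enumerate(trans) if t < threshold and i > start]
    -- end = min(below) if below else n - 1
    let e : Int :=
      match PySem.List.min?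
          (((PySem.List.enumerate trans 0).filter
            (fun p => decide (p.2 < threshold) && decide (start < p.1))).map Prod.fst)
          (fun x => x) with
      | none => (trans.length : Int) - 1
      | some e => e
    if cho = 0 then e - start
    else (PySem.List.pyGet? wave e).getD 0 - (PySem.List.pyGet? wave start).getD 0

-- ===== PRECONDITION & SPEC =====
-- Pre_ excludes inputs where A raises: no above-threshold value before the last
-- index (loop ends in assert False), and, when cho ≠ 0, wave shorter than trans,
-- where A's wave[i]/wave[start] indexing may raise IndexError (this also excludes
-- a few short-wave inputs where the band happens to end early enough that A still
-- returns; see the cite).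
def Pre_measure_one (wave : List Int) (trans : List Int) (threshold : Int) (cho : Int) : Prop :=
  (trans.dropLast.any (fun t => threshold < t)) = true ∧ (cho = 0 ∨ trans.length ≤ wave.length)
instance (wave : List Int) (trans : List Int) (threshold : Int) (cho : Int) : Decidable (Pre_measure_one wave trans threshold cho) := by unfold Pre_measure_one; infer_instance
def pvWitness_measure_one : List Int × List Int × Int × Int := ([0, 10, 20], [1, 5, 1], 3, 1)

def Spec_measure_one (wave : List Int) (trans : List Int) (threshold : Int) (cho : Int) (out : Int) : Prop := out = measure_one_alt wave trans threshold cho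
instance (wave : List Int) (trans : List Int) (threshold : Int) (cho : Int) (out : Int) : Decidable (Spec_measure_one wave trans threshold cho out) := by unfold Spec_measure_one; infer_instance

-- ===== CLAIM (what is proved, stated in full; the proofs are below) =====
def Claim_equal_measure_one : Prop := ∀ (wave : List Int) (trans : List Int) (threshold : Int) (cho : Int), Dom_measure_one wave trans threshold cho → Pre_measure_one wave trans threshold cho → Spec_measure_one wave trans threshold cho (measure_one wave trans threshold cho)

-- ===== LEMMAS AND PROOFS =====

-- A's return value once the band has started at s and the loop returns at index e
def retA (wave : List Int) (cho : Int) (s e : Nat) : Option Int :=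
  if cho = 0 then some ((e : Int) - (s : Int))
  else
    match PySem.List.pyGet? wave (e : Int), PySem.List.pyGet? wave ((s : Nat) : Int) with
    | some a, some b => some (a - b)
    | _, _ => none

-- phase 2: once start = s >= 0, the loop returns at the first later drop (or the last index)
lemma loopA_phase2 (wave trans : List Int) (threshold cho : Int) (s : Nat) :
    ∀ d i, trans.length - i = d → i < trans.length →
      measureLoopA wave trans threshold cho d i (Int.ofNat s) =
        retA wave cho s
          (match (trans.drop i).findIdx? (fun t => t < threshold) with
           | none => trans.length - 1
           | some k => i + k) := by
  intro d
  induction d with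
  | zero =>
    intro i hd hi
    exact absurd hi (Nat.not_lt.mpr (Nat.sub_eq_zero_iff_le.mp hd))
  | succ d ih =>
    intro i hd hi
    have hsne : (Int.ofNat s) ≠ -1 := by
      have h0 : (0 : Int) ≤ Int.ofNat s := Int.natCast_nonneg s
      omega
    have hget : trans.getD i 0 = trans[i] := by
      simp [List.getD_eq_getElem?_getD, List.getElem?_eq_getElem hi]
    have hdrop : trans[i] :: trans.drop (i + 1) = trans.drop i :=
      List.getElem_cons_drop hi
    rw [measureLoopA, if_pos hi, if_neg hsne]
    by_cases h1 : trans[i] < threshold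
    · rw [if_pos (Or.inl (by rw [hget]; exact h1))]
      have hs0 : (trans.drop i).findIdx? (fun t => t < threshold) = some 0 := by
        rw [← hdrop, List.findIdx?_cons]; simp [h1]
      simp only [hs0]
      simp [retA]
    · by_cases h2 : i = trans.length - 1
      · rw [if_pos (Or.inr h2)]
        have hnil : trans.drop (i + 1) = [] := List.drop_eq_nil_of_le (by omega)
        have hnone : (trans.drop i).findIdx? (fun t => t < threshold) = none := by
          rw [← hdrop, List.findIdx?_cons]
          simp [h1, hnil]
        simp only [hnone]
        rw [← h2]
        simp [retA]
      · rw [if_neg (by rw [hget]; tauto)]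
        rw [ih (i + 1) (by omega) (by omega)]
        rw [← hdrop, List.findIdx?_cons]
        cases hk : (trans.drop (i + 1)).findIdx? (fun t => t < threshold) with
        | none => simp [h1]
        | some k =>
          simp [h1]
          congr 1
          omega

-- phase 1: with start = -1 the loop scans to the first above-threshold index
lemma loopA_phase1 (wave trans : List Int) (threshold cho : Int) :
    ∀ d i, trans.length - i = d →
      measureLoopA wave trans threshold cho d i (-1) =
        (match (trans.drop i).findIdx? (fun t => threshold < t) with
         | none => none
         | some k =>
             measureLoopA wave trans threshold cho (trans.length - (i + k + 1)) (i + k + 1)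
               (Int.ofNat (i + k))) := by
  intro d
  induction d with
  | zero =>
    intro i hd
    have hge : trans.length ≤ i := by omega
    rw [measureLoopA, List.drop_eq_nil_of_le hge]
    simp [List.findIdx?_nil]
  | succ d ih =>
    intro i hd
    have hi : i < trans.length := by omega
    have hget : trans.getD i 0 = trans[i] := by
      simp [List.getD_eq_getElem?_getD, List.getElem?_eq_getElem hi]
    have hdrop : trans[i] :: trans.drop (i + 1) = trans.drop i :=
      List.getElem_cons_drop hi
    rw [measureLoopA, if_pos hi, if_pos rfl]
    by_cases h1 : threshold < trans[i]
    · rw [if_pos (by rw [hget]; exact h1)]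
      rw [← hdrop, List.findIdx?_cons]
      simp [h1]
      have hcnt : trans.length - (i + 1) = d := by omega
      rw [hcnt]
    · rw [if_neg (by rw [hget]; exact h1)]
      rw [ih (i + 1) (by omega)]
      rw [← hdrop, List.findIdx?_cons]
      cases hk : (trans.drop (i + 1)).findIdx? (fun t => threshold < t) with
      | none => simp [h1]
      | some k =>
        have e2 : i + 1 + k = i + (k + 1) := by omega
        simp only [h1, decide_eq_true_eq, Option.map_some, e2]
        simp [Nat.add_comm]

-- running min of a list everything of which is ≥ the seed is the seed
lemma foldl_min_eq_seed (x : Int) (t : List Int) (h : ∀ y ∈ t, x ≤ y) :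
    t.foldl min x = x := by
  induction t with
  | nil => rfl
  | cons a t ih =>
    have hxa : min x a = x := min_eq_left (h a (by simp))
    simp only [List.foldl_cons, hxa]
    exact ih (fun y hy => h y (by simp [hy]))

-- on a strictly ascending list, Python's min is the head
lemma min?_eq_head?_of_sorted (xs : List Int) (h : xs.Pairwise (· < ·)) :
    PySem.List.min? xs (fun x => x) = xs.head? := by
  cases xs with
  | nil => simp [PySem.List.min?_eq_none_iff]
  | cons x t =>
    rw [PySem.List.min?_id_cons]
    have := List.pairwise_cons.mp h
    rw [foldl_min_eq_seed x t (fun y hy => le_of_lt (this.1 y hy))]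
    rfl

-- head of the candidate list [i for i,t in enumerate(l, s) if q t] is the first match
lemma head_filter_enumerate (q : Int → Bool) (l : List Int) :
    ∀ s : Int,
      ((((PySem.List.enumerate l s).filter (fun p => q p.2)).map Prod.fst)).head? =
        (l.findIdx? q).map (fun k => s + (k : Int)) := by
  induction l with
  | nil => intro s; simp [PySem.List.enumerate_nil, List.findIdx?_nil]
  | cons a t ih =>
    intro s
    rw [PySem.List.enumerate_cons, List.findIdx?_cons]
    by_cases hq : q a
    · simp [hq]
    · simp only [List.filter_cons, hq, Bool.false_eq_true, if_false]
      rw [ih (s + 1)]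
      cases ht : t.findIdx? q with
      | none => simp
      | some k =>
        simp
        omega

-- the candidate indices are strictly ascending
lemma candidates_sorted (q : Int × Int → Bool) (l : List Int) (s : Int) :
    (((PySem.List.enumerate l s).filter q).map Prod.fst).Pairwise (· < ·) := by
  rw [List.pairwise_map]
  exact (PySem.List.pairwise_lt_enumerate l s).filter q

-- restricting the candidates to indices > s is the same as enumerating the tail from s+1
lemma filter_enumerate_gt (q : Int → Bool) (l : List Int) (s : Nat) (hs : s + 1 ≤ l.length) :
    (PySem.List.enumerate l 0).filter (fun p => q p.2 && decide ((s : Int) < p.1)) =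
      (PySem.List.enumerate (l.drop (s + 1)) ((s : Int) + 1)).filter (fun p => q p.2) := by
  conv_lhs => rw [← List.take_append_drop (s + 1) l]
  rw [PySem.List.enumerate_append, List.filter_append]
  have hlen : (l.take (s + 1)).length = s + 1 := List.length_take_of_le hs
  have h1 : (PySem.List.enumerate (l.take (s + 1)) 0).filter
      (fun p => q p.2 && decide ((s : Int) < p.1)) = [] := by
    rw [List.filter_eq_nil_iff]
    intro p hp
    obtain ⟨k, hk, rfl⟩ := (PySem.List.mem_enumerate_iff _ _ _).mp hp
    rw [hlen] at hk
    simp only [Bool.and_eq_true, decide_eq_true_eq, not_and]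
    intro _
    omega
  rw [h1, List.nil_append, hlen]
  have h2 : (0 : Int) + (↑(s + 1) : Int) = (s : Int) + 1 := by push_cast; ring
  rw [h2]
  apply List.filter_congr
  intro p hp
  obtain ⟨k, hk, rfl⟩ := (PySem.List.mem_enumerate_iff _ _ _).mp hp
  have hge : decide ((s : Int) < (s : Int) + 1 + (k : Nat)) = true := by
    simp; omega
  rw [hge, Bool.and_true]

-- ===== VERDICT (by name: the statement is the Claim_ definition above) =====
theorem measure_one_spec : Claim_equal_measure_one := by
  unfold Claim_equal_measure_one
  intro wave trans threshold cho _ hPre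
  obtain ⟨hany, hcho⟩ := hPre
  unfold Spec_measure_one measure_one measure_one_alt
  rw [List.any_eq_true] at hany
  obtain ⟨x, hxmem, hx⟩ := hany
  obtain ⟨j, hj, hjx⟩ := List.getElem_of_mem hxmem
  have hjlen : j < trans.length - 1 := by
    have := List.length_dropLast (xs := trans); omega
  have hjt : threshold < trans[j]'(by omega) := by
    have hd := List.getElem_dropLast (xs := trans) (i := j) hj
    rw [hjx] at hd
    simp only [decide_eq_true_eq] at hx
    rw [← hd]; exact hx
  cases hfi : trans.findIdx? (fun t => threshold < t) with
  | none =>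
    rw [List.findIdx?_eq_none_iff] at hfi
    have := hfi (trans[j]'(by omega)) (List.getElem_mem _)
    simp [hjt] at this
  | some s =>
    rw [List.findIdx?_eq_some_iff_getElem] at hfi
    obtain ⟨hslen, hps, hmin⟩ := hfi
    have hslt : s < trans.length - 1 := by
      by_contra hc
      have hjs : j < s := by omega
      have := hmin j hjs
      simp [hjt] at this
    -- B's 'start': min of the above-threshold candidate list is (s : Int)
    have habove : PySem.List.min?
        (((PySem.List.enumerate trans 0).filter (fun p => decide (threshold < p.2))).map Prod.fst)
        (fun x => x) = some (s : Int) := by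
      rw [min?_eq_head?_of_sorted _ (candidates_sorted _ trans 0),
        head_filter_enumerate (fun t => decide (threshold < t)) trans 0,
        List.findIdx?_eq_some_iff_getElem.mpr ⟨hslen, by simpa using hps, by simpa using hmin⟩]
      simp
    -- A's loop, staged through both phases
    have h1 := loopA_phase1 wave trans threshold cho trans.length 0 (Nat.sub_zero _)
    rw [List.drop_zero] at h1
    rw [List.findIdx?_eq_some_iff_getElem.mpr ⟨hslen, hps, hmin⟩] at h1
    simp only [Nat.zero_add] at h1
    have h2 := loopA_phase2 wave trans threshold cho s _ (s + 1) rfl (by omega)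
    rw [h1, h2]
    -- B's 'below' candidate list, rewritten as a find in the tail
    have hbelow : PySem.List.min?
        (((PySem.List.enumerate trans 0).filter
          (fun p => decide (p.2 < threshold) && decide ((s : Int) < p.1))).map Prod.fst)
        (fun x => x) =
        ((trans.drop (s + 1)).findIdx? (fun t => t < threshold)).map
          (fun k => ((s : Int) + 1) + (k : Int)) := by
      rw [filter_enumerate_gt (fun t => decide (t < threshold)) trans s (by omega),
        min?_eq_head?_of_sorted _ (candidates_sorted _ _ _),
        head_filter_enumerate (fun t => decide (t < threshold)) (trans.drop (s + 1)) ((s : Int) + 1)]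
    cases hk : (trans.drop (s + 1)).findIdx? (fun t => t < threshold) with
    | none =>
      have hb : PySem.List.min?
          (((PySem.List.enumerate trans 0).filter
            (fun p => decide (p.2 < threshold) && decide ((s : Int) < p.1))).map Prod.fst)
          (fun x => x) = none := by rw [hbelow, hk]; rfl
      simp only [habove, hb]
      by_cases hc : cho = 0
      · simp [retA, hc]
        try omega
      · have hwl : trans.length ≤ wave.length := hcho.resolve_left hc
        have hEw : trans.length - 1 < wave.length := by omega
        have hsw : s < wave.length := by omega
        have hcast : ((trans.length : Int) - 1) = ((trans.length - 1 : Nat) : Int) := by omega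
        simp [retA, hc, hcast, List.getElem?_eq_getElem hEw, List.getElem?_eq_getElem hsw]
    | some k =>
      have hklen : k < (trans.drop (s + 1)).length := by
        rw [List.findIdx?_eq_some_iff_getElem] at hk
        exact hk.1
      have hElen : s + 1 + k < trans.length := by
        rw [List.length_drop] at hklen; omega
      have hb : PySem.List.min?
          (((PySem.List.enumerate trans 0).filter
            (fun p => decide (p.2 < threshold) && decide ((s : Int) < p.1))).map Prod.fst)
          (fun x => x) = some ((s : Int) + 1 + (k : Int)) := by rw [hbelow, hk]; rfl
      simp only [habove, hb]
      by_cases hc : cho = 0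
      · simp [retA, hc]
        try omega
      · have hwl : trans.length ≤ wave.length := hcho.resolve_left hc
        have hEw : s + 1 + k < wave.length := by omega
        have hsw : s < wave.length := by omega
        have hsome : PySem.List.pyGet? wave ((s : Int) + 1 + (k : Int)) = some (wave[s + 1 + k]'hEw) := by
          have hcast : ((s : Int) + 1 + (k : Int)) = ((s + 1 + k : Nat) : Int) := by push_cast; ring
          rw [hcast, PySem.List.pyGet?_natCast, List.getElem?_eq_getElem hEw]
        simp [retA, hc, hsome, List.getElem?_eq_getElem hsw]
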